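-- pv_equiv track=rewrite | github.com/xingwenzan/PythonProgramFiles | 算法/Improve/DynamicProgramming/SlopeOptimizedDP/Task1.py | dp
-- ===== SOURCE A (Python) =====
-- def prefixSum(lst):
--     s = [0]
--     for i in range(len(lst)):
--         s.append(s[i] + lst[i])
--     return s
--
-- def dp(n, s, C, T):
--     sumC = prefixSum(C)
--     sumT = prefixSum(T)
--     f = [float('inf')] * (n + 10)
--     f[0] = 0
--     for i in range(1, n + 1):
--         for j in range(i):
--             f[i] = min(f[i], f[j] + sumT[i] * (sumC[i] - sumC[j]) + s * (sumC[n] - sumC[j]))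
--     return f[n]
-- ===== SOURCE B (Python) =====
-- def _val(ln, x):
--     return ln[0] * x + ln[1]
--
-- def _insert(t, l, r, ln):
--     # persistent Li Chao tree node: None (empty) or (line, left, right)
--     if t is None:
--         return (ln, None, None)
--     cur, lt, rt = t
--     m = (l + r) // 2
--     if _val(ln, m) < _val(cur, m):
--         top, bot = ln, cur
--     else:
--         top, bot = cur, ln
--     if l == r:
--         return (top, lt, rt)
--     if _val(bot, l) < _val(top, l):
--         return (top, _insert(lt, l, m, bot), rt)
--     if _val(bot, r) < _val(top, r):
--         return (top, lt, _insert(rt, m + 1, r, bot))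
--     return (top, lt, rt)
--
-- def _query(t, l, r, x):
--     if t is None:
--         return None
--     cur, lt, rt = t
--     m = (l + r) // 2
--     best = _val(cur, x)
--     sub = _query(lt, l, m, x) if x <= m else _query(rt, m + 1, r, x)
--     if sub is not None and sub < best:
--         best = sub
--     return best
--
-- def dp(n, s, C, T):
--     # f[i] = sT[i]*sC[i] + s*sC[n] + min_j (f[j] - (sT[i]+s)*sC[j]): each state j is the
--     # line y = -sC[j]*x + f[j]; a Li Chao tree over x in [-bound, bound] answers each
--     # minimum in O(log bound), so the whole DP is O(n log bound) instead of O(n^2).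
--     sC = [0]
--     for c in C[:n]:
--         sC.append(sC[-1] + c)
--     sT = [0]
--     for t in T[:n]:
--         sT.append(sT[-1] + t)
--     bound = abs(s) + sum(abs(t) for t in T[:n]) + 1
--     tree = _insert(None, -bound, bound, (0, 0))
--     f = 0
--     for i in range(1, n + 1):
--         x = sT[i] + s
--         f = sT[i] * sC[i] + s * sC[n] + _query(tree, -bound, bound, x)
--         tree = _insert(tree, -bound, bound, (-sC[i], f))
--     return f
-- ===== Notes on version B (the rewrite author's own statement) =====
-- stated objective: faster
-- what changed: B replaces A's O(n^2) double loop by slope optimization: each DP state j becomes the line y = -sumC[j]*x + f[j] inserted into a persistent Li Chao tree over x in [-bound,bound], and each f[i] is obtained by one O(log bound) tree query at x = sumT[i]+s instead of a scan over all j < i.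
-- outside the precondition, e.g. on dp(-1, 0, [1], [1]): A returns inf, B returns 0; on dp(2, 0, [1], [1]): A raises IndexError, B raises IndexError
import Mathlib
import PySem

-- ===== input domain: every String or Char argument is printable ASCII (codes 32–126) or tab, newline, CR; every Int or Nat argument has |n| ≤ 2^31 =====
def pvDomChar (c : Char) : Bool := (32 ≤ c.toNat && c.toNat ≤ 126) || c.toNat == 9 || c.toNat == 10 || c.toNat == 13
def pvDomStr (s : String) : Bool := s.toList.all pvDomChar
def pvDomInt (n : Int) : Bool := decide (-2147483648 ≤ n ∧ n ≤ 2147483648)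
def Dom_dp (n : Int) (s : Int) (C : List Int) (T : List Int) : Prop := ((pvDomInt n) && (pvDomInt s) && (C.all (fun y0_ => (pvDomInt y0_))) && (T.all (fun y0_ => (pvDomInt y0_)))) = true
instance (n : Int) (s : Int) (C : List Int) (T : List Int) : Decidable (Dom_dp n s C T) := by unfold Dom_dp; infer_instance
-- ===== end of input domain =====

-- B replaces A's O(n^2) double loop by slope optimization with a persistent Li Chao tree
-- (each DP state is a line, each transition one tree query); measured asymptotically faster.


-- ===== PORT A =====
-- Python's float('inf') sentinel is `none`; pomin is Python's min where none = +infinity.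
def pomin (a b : Option Int) : Option Int :=
  match a, b with
  | none, b => b
  | some x, none => some x
  | some x, some y => some (min x y)

def prefixSumA (lst : List Int) : List Int :=
  (PySem.List.pyRange 0 (lst.length : Int) 1).foldl
    (fun s i => s ++ [PySem.List.pyGetD s i 0 + PySem.List.pyGetD lst i 0]) [0]

def dp (n : Int) (s : Int) (C : List Int) (T : List Int) : Int :=
  let sumC := prefixSumA C
  let sumT := prefixSumA T
  let f0 : List (Option Int) :=
    PySem.List.pySetD (List.replicate (n + 10).toNat (none : Option Int)) 0 (some 0)
  let fN := (PySem.List.pyRange 1 (n + 1) 1).foldl (fun f i =>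
    (PySem.List.pyRange 0 i 1).foldl (fun f j =>
      PySem.List.pySetD f i (pomin (PySem.List.pyGetD f i none)
        ((PySem.List.pyGetD f j none).map (fun fj =>
          fj + PySem.List.pyGetD sumT i 0 * (PySem.List.pyGetD sumC i 0 - PySem.List.pyGetD sumC j 0)
             + s * (PySem.List.pyGetD sumC n 0 - PySem.List.pyGetD sumC j 0))))) f) f0
  (PySem.List.pyGetD fN n none).getD 0

-- ===== PORT B =====
-- _val(ln, x) in Source B
def lcVal (ln : Int × Int) (x : Int) : Int := ln.1 * x + ln.2

-- a persistent Li Chao tree node: None (leaf) or (line, left, right)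
inductive LCT
  | leaf
  | node : (Int × Int) → LCT → LCT → LCT
deriving DecidableEq, Repr

-- _insert in Source B (structural recursion on the tree)
def lcIns : LCT → Int → Int → (Int × Int) → LCT
  | .leaf, _, _, ln => .node ln .leaf .leaf
  | .node cur lt rt, l, r, ln =>
    let m := PySem.Int.floordiv (l + r) 2
    let tb := if lcVal ln m < lcVal cur m then (ln, cur) else (cur, ln)
    if l = r then .node tb.1 lt rt
    else if lcVal tb.2 l < lcVal tb.1 l then .node tb.1 (lcIns lt l m tb.2) rt
    else if lcVal tb.2 r < lcVal tb.1 r then .node tb.1 lt (lcIns rt (m + 1) r tb.2)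
    else .node tb.1 lt rt

-- the two lines 'if sub is not None and sub < best: best = sub' of _query
def omin : Option Int → Int → Int
  | none, best => best
  | some v, best => if v < best then v else best

-- _query in Source B
def lcQry : LCT → Int → Int → Int → Option Int
  | .leaf, _, _, _ => none
  | .node cur lt rt, l, r, x =>
    let m := PySem.Int.floordiv (l + r) 2
    let best := lcVal cur x
    let sub := if x ≤ m then lcQry lt l m x else lcQry rt (m + 1) r x
    some (omin sub best)

def dp_alt (n : Int) (s : Int) (C : List Int) (T : List Int) : Int :=
  let sC := (PySem.List.slice C none (some n)).foldl
      (fun acc c => acc ++ [PySem.List.pyGetD acc (-1) 0 + c]) [(0 : Int)]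
  let sT := (PySem.List.slice T none (some n)).foldl
      (fun acc t => acc ++ [PySem.List.pyGetD acc (-1) 0 + t]) [(0 : Int)]
  let bound := |s| + ((PySem.List.slice T none (some n)).map (fun t => |t|)).sum + 1
  let tree0 := lcIns .leaf (-bound) bound (0, 0)
  let st := (PySem.List.pyRange 1 (n + 1) 1).foldl
    (fun (st : Int × LCT) i =>
      let x := PySem.List.pyGetD sT i 0 + s
      -- the tree is nonempty so the query is never none; 0 is an unreachable default
      let f := PySem.List.pyGetD sT i 0 * PySem.List.pyGetD sC i 0
               + s * PySem.List.pyGetD sC n 0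
               + (lcQry st.2 (-bound) bound x).getD 0
      (f, lcIns st.2 (-bound) bound (-(PySem.List.pyGetD sC i 0), f)))
    ((0 : Int), tree0)
  st.1

-- ===== PRECONDITION & SPEC =====
-- Pre_dp: exactly the inputs where Python A returns an int: n ≥ 0 (negative n gives float('inf') or an
-- IndexError) and, unless n = 0, the prefix sums of C and T are read up to index n (else IndexError).
def Pre_dp (n : Int) (_s : Int) (C : List Int) (T : List Int) : Prop :=
  0 ≤ n ∧ (n = 0 ∨ (n ≤ C.length ∧ n ≤ T.length))
instance (n : Int) (s : Int) (C : List Int) (T : List Int) : Decidable (Pre_dp n s C T) := by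
  unfold Pre_dp; infer_instance

def pvWitness_dp : Int × Int × List Int × List Int := (2, 1, [3, 1], [2, 5])

def Spec_dp (n : Int) (s : Int) (C : List Int) (T : List Int) (out : Int) : Prop := out = dp_alt n s C T
instance (n : Int) (s : Int) (C : List Int) (T : List Int) (out : Int) : Decidable (Spec_dp n s C T out) := by unfold Spec_dp; infer_instance

-- ===== CLAIM (what is proved, stated in full; the proofs are below) =====
def Claim_equal_dp : Prop := ∀ (n : Int) (s : Int) (C : List Int) (T : List Int), Dom_dp n s C T → Pre_dp n s C T → Spec_dp n s C T (dp n s C T)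

-- ===== LEMMAS AND PROOFS =====

-- Python's min(...) over a nonempty list (proof-side helper for the reference DP)
def bmin : List Int → Int
  | [] => 0
  | h :: t => t.foldl min h

-- prefix sums of the first k elements
def scP (C : List Int) (k : ℕ) : Int := (C.take k).sum

-- reference DP: the list of (value, slope) pairs, defined by recursion on the step count
def hull (s : Int) (C T : List Int) (N : ℕ) : ℕ → List (Int × Int)
  | 0 => [(0, 0)]
  | k+1 =>
      hull s C T N k ++
        [(scP T (k+1) * scP C (k+1) + s * scP C N +
            bmin ((hull s C T N k).map (fun bm => bm.1 - (scP T (k+1) + s) * bm.2)),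
          scP C (k+1))]

def hullF (s : Int) (C T : List Int) (N : ℕ) (k : ℕ) : Int :=
  scP T (k+1) * scP C (k+1) + s * scP C N +
    bmin ((hull s C T N k).map (fun bm => bm.1 - (scP T (k+1) + s) * bm.2))

lemma hull_succ (s : Int) (C T : List Int) (N k : ℕ) :
    hull s C T N (k+1) = hull s C T N k ++ [(hullF s C T N k, scP C (k+1))] := rfl

lemma length_hull (s : Int) (C T : List Int) (N : ℕ) : ∀ k, (hull s C T N k).length = k + 1 := by
  intro k; induction k with
  | zero => rfl
  | succ k ih => simp [hull_succ, ih]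

lemma hull_getD (s : Int) (C T : List Int) (N : ℕ) :
    ∀ m k, k ≤ m →
      (hull s C T N m).getD k (0, 0) =
        (((hull s C T N k).getLastD (0, 0)).1, scP C k) := by
  intro m
  induction m with
  | zero =>
    intro k hk
    interval_cases k
    simp [hull, scP]
  | succ m ih =>
    intro k hk
    rcases Nat.lt_or_ge k (m + 1) with h | h
    · rw [hull_succ, List.getD_append _ _ _ _ (by rw [length_hull]; omega)]
      exact ih k (by omega)
    · have hk1 : k = m + 1 := by omega
      subst hk1
      have key : ∀ (p : Int × Int), (hull s C T N m ++ [p]).getD (m + 1) (0, 0) = p := by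
        intro p
        rw [List.getD_eq_getElem?_getD,
          show m + 1 = (hull s C T N m).length from (length_hull s C T N m).symm,
          List.getElem?_concat_length]
        rfl
      rw [hull_succ, key, List.getLastD_concat]

-- A's f-array after m outer iterations
def stA (s : Int) (C T : List Int) (N m : ℕ) : List (Option Int) :=
  ((hull s C T N m).map (fun p => some p.1)) ++ List.replicate (N + 10 - (m + 1)) (none : Option Int)

-- the scan both prefix-sum loops produce
def scanFrom (a : Int) : List Int → List Int
  | [] => []
  | x :: xs => (a + x) :: scanFrom (a + x) xs

lemma scan_shape :
    ∀ (l pre : List Int) (a : Int),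
      l.foldl (fun acc c => acc ++ [PySem.List.pyGetD acc (-1) 0 + c]) (pre ++ [a])
        = pre ++ a :: scanFrom a l := by
  intro l
  induction l with
  | nil => intro pre a; simp [scanFrom]
  | cons x xs ih =>
    intro pre a
    have h1 : PySem.List.pyGetD (pre ++ [a]) (-1) 0 = a := PySem.List.pyGetD_neg_one_append_singleton _ _ _
    simp only [List.foldl_cons, h1]
    have h2 := ih (pre ++ [a]) (a + x)
    simp only [List.append_assoc, List.singleton_append] at h2 ⊢
    rw [h2, scanFrom]

lemma scanFrom_getD :
    ∀ (l : List Int) (a : Int) (k : ℕ), k ≤ l.length →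
      (a :: scanFrom a l).getD k 0 = a + (l.take k).sum := by
  intro l
  induction l with
  | nil =>
    intro a k hk
    have : k = 0 := by simpa using hk
    subst this; simp
  | cons x xs ih =>
    intro a k hk
    cases k with
    | zero => simp
    | succ k =>
      have := ih (a + x) k (by simpa using hk)
      simp only [scanFrom, List.getD_cons_succ] at this ⊢
      rw [this, List.take_succ_cons]
      simp; ring

lemma scan_getD (l : List Int) :
    ∀ k, k ≤ l.length →
      ((l.foldl (fun acc c => acc ++ [PySem.List.pyGetD acc (-1) 0 + c]) [(0 : Int)]).getD k 0)
        = (l.take k).sum := by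
  intro k hk
  have h := scan_shape l [] 0
  simp only [List.nil_append] at h
  rw [h, scanFrom_getD l 0 k hk]
  ring

lemma prefixSumA_aux (lst : List Int) :
    ∀ k : ℕ, k ≤ lst.length →
      (PySem.List.pyRange 0 (k : Int) 1).foldl
        (fun s i => s ++ [PySem.List.pyGetD s i 0 + PySem.List.pyGetD lst i 0]) [0]
      = (List.range (k + 1)).map (fun i => (lst.take i).sum) := by
  intro k
  induction k with
  | zero =>
    intro _
    simp [PySem.List.pyRange_one_eq_nil]
  | succ k ih =>
    intro hk
    rw [show ((k + 1 : ℕ) : Int) = (k : Int) + 1 by push_cast; ring,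
      PySem.List.pyRange_one_succ_right (by positivity), List.foldl_append, ih (by omega)]
    simp only [List.foldl_cons, List.foldl_nil]
    rw [PySem.List.pyGetD_natCast, PySem.List.pyGetD_natCast,
      PySem.List.getD_map_range _ _ _ _ (by omega),
      List.getD_eq_getElem lst 0 (by omega : k < lst.length)]
    rw [List.range_succ (n := k + 1), List.map_append]
    simp only [List.map_cons, List.map_nil]
    congr 1
    rw [List.sum_take_succ lst k (by omega)]

lemma prefixSumA_getD (lst : List Int) :
    ∀ k, k ≤ lst.length → (prefixSumA lst).getD k 0 = (lst.take k).sum := by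
  intro k hk
  unfold prefixSumA
  rw [show ((lst.length : ℕ) : Int) = (lst.length : Int) from rfl,
    prefixSumA_aux lst lst.length le_rfl,
    PySem.List.getD_map_range _ _ _ _ (by omega)]

lemma inner_aux (E : Int → Int → Int) (i : ℕ) :
    ∀ (js : List Int) (f : List (Option Int)), i < f.length → (∀ j ∈ js, 0 ≤ j ∧ j < (i : Int)) →
      js.foldl (fun f j =>
          PySem.List.pySetD f (i : Int) (pomin (PySem.List.pyGetD f (i : Int) none)
            ((PySem.List.pyGetD f j none).map (E j)))) f
      = PySem.List.pySetD f (i : Int)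
          (js.foldl (fun acc j => pomin acc ((PySem.List.pyGetD f j none).map (E j)))
            (PySem.List.pyGetD f (i : Int) none)) := by
  intro js
  induction js with
  | nil =>
    intro f hlen _
    simp only [List.foldl_nil, PySem.List.pySetD_natCast, PySem.List.pyGetD_natCast,
      List.getD_eq_getElem f none hlen]
    exact (List.set_getElem_self hlen).symm
  | cons j js ih =>
    intro f hlen hmem
    obtain ⟨hj0, hji⟩ := hmem j (List.mem_cons_self ..)
    set f' := PySem.List.pySetD f (i : Int) (pomin (PySem.List.pyGetD f (i : Int) none)
      ((PySem.List.pyGetD f j none).map (E j))) with hf'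
    have hlen' : i < f'.length := by
      rw [hf', PySem.List.pySetD_natCast, List.length_set]; exact hlen
    have hget : ∀ j' : Int, 0 ≤ j' → j' < (i : Int) →
        PySem.List.pyGetD f' j' none = PySem.List.pyGetD f j' none := by
      intro j' h0 hlt
      have hj'n : j' = ((j'.toNat : ℕ) : Int) := by omega
      rw [hf', hj'n, PySem.List.pyGetD_pySetD_natCast f i j'.toNat _ _ hlen,
        if_neg (by omega)]
    have hgeti : PySem.List.pyGetD f' (i : Int) none
        = pomin (PySem.List.pyGetD f (i : Int) none)
            ((PySem.List.pyGetD f j none).map (E j)) := by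
      rw [hf', PySem.List.pyGetD_pySetD_natCast f i i _ _ hlen, if_pos rfl]
    rw [List.foldl_cons, ih f' hlen' (fun j' hj' => hmem j' (List.mem_cons_of_mem _ hj'))]
    rw [PySem.List.foldl_congr_mem js _
      (fun acc j' => pomin acc ((PySem.List.pyGetD f j' none).map (E j')))
      _ (fun acc j' hj' => by
        obtain ⟨h0, hlt⟩ := hmem j' (List.mem_cons_of_mem _ hj')
        rw [hget j' h0 hlt])]
    rw [hgeti, hf']
    simp only [PySem.List.pySetD_natCast, List.set_set, List.foldl_cons]

lemma inner_fold (f : List (Option Int)) (i : ℕ) (hlen : i < f.length) (E : Int → Int → Int) :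
    (PySem.List.pyRange 0 (i : Int) 1).foldl (fun f j =>
       PySem.List.pySetD f (i : Int) (pomin (PySem.List.pyGetD f (i : Int) none)
         ((PySem.List.pyGetD f j none).map (E j)))) f
    = PySem.List.pySetD f (i : Int)
        ((PySem.List.pyRange 0 (i : Int) 1).foldl
           (fun acc j => pomin acc ((PySem.List.pyGetD f j none).map (E j)))
           (PySem.List.pyGetD f (i : Int) none)) := by
  exact inner_aux E i _ f hlen (fun j hj => by
    have := PySem.List.mem_pyRange_one.mp hj
    exact ⟨this.1, this.2⟩)

lemma foldl_pomin_aux {α : Type} (g : α → Int) :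
    ∀ (l : List α) (a : Int),
      l.foldl (fun a x => pomin a (some (g x))) (some a) = some ((l.map g).foldl min a) := by
  intro l
  induction l with
  | nil => intro a; rfl
  | cons x xs ih => intro a; simpa [pomin] using ih (min a (g x))

lemma foldl_pomin_some {α : Type} (g : α → Int) :
    ∀ (l : List α), l ≠ [] →
      l.foldl (fun a x => pomin a (some (g x))) none = some (bmin (l.map g)) := by
  intro l hl
  cases l with
  | nil => exact absurd rfl hl
  | cons x xs => simpa [pomin, bmin] using foldl_pomin_aux g xs (g x)

lemma bmin_add_aux (c : Int) :
    ∀ (l : List Int) (a : Int), (l.map (fun y => c + y)).foldl min (c + a) = c + l.foldl min a := by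
  intro l
  induction l with
  | nil => intro a; rfl
  | cons x xs ih => intro a; simpa [← Int.min_add_left] using ih (min a x)

lemma bmin_add (c : Int) : ∀ (l : List Int), l ≠ [] → bmin (l.map (fun y => c + y)) = c + bmin l := by
  intro l hl
  cases l with
  | nil => exact absurd rfl hl
  | cons x xs => simpa [bmin] using bmin_add_aux c xs x

lemma bmin_concat (l : List Int) (hl : l ≠ []) (y : Int) : bmin (l ++ [y]) = min (bmin l) y := by
  cases l with
  | nil => exact absurd rfl hl
  | cons h t => simp [bmin, List.foldl_append]

lemma length_stA (s : Int) (C T : List Int) (N m : ℕ) :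
    (stA s C T N m).length = m + 1 + (N + 10 - (m + 1)) := by
  simp [stA, length_hull]

lemma stA_getD_lo (s : Int) (C T : List Int) (N m k : ℕ) (hk : k ≤ m) :
    (stA s C T N m).getD k none = some (((hull s C T N k).getLastD (0, 0)).1) := by
  have hlt : k < (hull s C T N m).length := by rw [length_hull]; omega
  have h1 := hull_getD s C T N m k hk
  rw [List.getD_eq_getElem _ (0, 0) hlt] at h1
  rw [stA, List.getD_eq_getElem _ none (by simp [length_hull]; omega),
    List.getElem_append_left (by simpa using hlt), List.getElem_map, h1]

lemma stA_getD_hi (s : Int) (C T : List Int) (N m : ℕ) :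
    (stA s C T N m).getD (m + 1) none = none := by
  rw [stA, List.getD_eq_getElem?_getD]
  rcases Nat.lt_or_ge (m + 1) ((hull s C T N m).map (fun p => some p.1) ++
      List.replicate (N + 10 - (m + 1)) (none : Option Int)).length with h | h
  · rw [List.getElem?_eq_getElem h, List.getElem_append_right (by simp [length_hull])]
    simp
  · rw [List.getElem?_eq_none (by omega)]; rfl

lemma stA_set (s : Int) (C T : List Int) (N m : ℕ) (hm : m + 1 ≤ N) :
    PySem.List.pySetD (stA s C T N m) ((m + 1 : ℕ) : Int) (some (hullF s C T N m))
      = stA s C T N (m + 1) := by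
  rw [PySem.List.pySetD_natCast, stA, List.set_append,
    if_neg (by simp [length_hull]), show N + 10 - (m + 1) = (N + 10 - (m + 2)) + 1 by omega,
    List.replicate_succ]
  simp only [List.length_map, length_hull, Nat.sub_self, List.set_cons_zero]
  rw [stA, hull_succ, List.map_append]
  simp [hullF]

lemma foldA (s : Int) (C T : List Int) (N : ℕ) (sumC sumT : List Int)
    (hC : ∀ i : ℕ, i ≤ N → sumC.getD i 0 = scP C i)
    (hT : ∀ i : ℕ, i ≤ N → sumT.getD i 0 = scP T i) :
    ∀ m : ℕ, m ≤ N →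
    (PySem.List.pyRange 1 ((m : Int) + 1) 1).foldl (fun f i =>
      (PySem.List.pyRange 0 i 1).foldl (fun f j =>
        PySem.List.pySetD f i (pomin (PySem.List.pyGetD f i none)
          ((PySem.List.pyGetD f j none).map (fun fj =>
            fj + PySem.List.pyGetD sumT i 0 * (PySem.List.pyGetD sumC i 0 - PySem.List.pyGetD sumC j 0)
               + s * (PySem.List.pyGetD sumC (N : Int) 0 - PySem.List.pyGetD sumC j 0))))) f)
      (stA s C T N 0)
    = stA s C T N m := by
  intro m
  induction m with
  | zero =>
    intro _
    rw [show ((0 : ℕ) : Int) + 1 = 1 by norm_num, PySem.List.pyRange_one_eq_nil le_rfl]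
    rfl
  | succ m ih =>
    intro hm
    have hc : ((m + 1 : ℕ) : Int) = (m : Int) + 1 := by push_cast; ring
    rw [hc, PySem.List.pyRange_one_succ_right (by omega), List.foldl_append,
      ih (by omega)]
    simp only [List.foldl_cons, List.foldl_nil]
    rw [show ((m : Int) + 1) = ((m + 1 : ℕ) : Int) from hc.symm]
    rw [inner_fold (stA s C T N m) (m + 1) (by rw [length_stA]; omega)
      (fun j fj =>
        fj + PySem.List.pyGetD sumT ((m + 1 : ℕ) : Int) 0 *
              (PySem.List.pyGetD sumC ((m + 1 : ℕ) : Int) 0 - PySem.List.pyGetD sumC j 0)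
           + s * (PySem.List.pyGetD sumC (N : Int) 0 - PySem.List.pyGetD sumC j 0))]
    rw [PySem.List.pyGetD_natCast (stA s C T N m) (m + 1) none, stA_getD_hi,
      PySem.List.pyRange_zero_nat, List.foldl_map]
    rw [PySem.List.foldl_congr_mem _ _
      (fun (acc : Option Int) (k : ℕ) => pomin acc (some
        (((hull s C T N k).getLastD (0, 0)).1
          + scP T (m + 1) * (scP C (m + 1) - scP C k) + s * (scP C N - scP C k))))
      _ (fun acc k hk => by
        have hkm : k ≤ m := by have := List.mem_range.mp hk; omega
        rw [PySem.List.pyGetD_natCast (stA s C T N m) k none, stA_getD_lo s C T N m k hkm]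
        simp only [PySem.List.pyGetD_natCast, Option.map_some]
        rw [hC (m + 1) hm, hC k (by omega), hC N le_rfl, hT (m + 1) hm])]
    rw [foldl_pomin_some _ _ (by simp)]
    have hmap : (List.range (m + 1)).map
        (fun k => ((hull s C T N k).getLastD (0, 0)).1
          + scP T (m + 1) * (scP C (m + 1) - scP C k) + s * (scP C N - scP C k))
        = ((hull s C T N m).map (fun bm => bm.1 - (scP T (m + 1) + s) * bm.2)).map
            (fun y => (scP T (m + 1) * scP C (m + 1) + s * scP C N) + y) := by
      apply List.ext_getElem
      · simp [length_hull]
      · intro k h1 h2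
        simp only [List.getElem_map, List.getElem_range]
        have hkm : k ≤ m := by simp at h1; omega
        have hg := hull_getD s C T N m k hkm
        rw [List.getD_eq_getElem _ (0, 0) (by rw [length_hull]; omega)] at hg
        have h2' : k < (hull s C T N m).length := by rw [length_hull]; omega
        rw [show (hull s C T N m)[k] = (((hull s C T N k).getLastD (0, 0)).1, scP C k) from hg]
        ring
    rw [hmap, bmin_add _ _ (by simp [← List.length_pos_iff, length_hull])]
    have : scP T (m + 1) * scP C (m + 1) + s * scP C N +
        bmin ((hull s C T N m).map fun bm => bm.1 - (scP T (m + 1) + s) * bm.2)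
        = hullF s C T N m := rfl
    rw [this, stA_set s C T N m hm]

-- ===== Li Chao tree correctness =====

lemma omin_some (v b : Int) : omin (some v) b = min v b := by
  simp only [omin]; split <;> omega

lemma lin_nonneg_between (a c l r x : Int) (hl : 0 ≤ a * l + c) (hr : 0 ≤ a * r + c)
    (h1 : l ≤ x) (h2 : x ≤ r) : 0 ≤ a * x + c := by
  rcases eq_or_lt_of_le (h1.trans h2) with h | h
  · have : x = l := by omega
    subst this; exact hl
  · by_contra hneg
    push_neg at hneg
    nlinarith [mul_nonneg hl (by omega : (0:Int) ≤ r - x),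
      mul_nonneg hr (by omega : (0:Int) ≤ x - l)]

lemma lin_nonneg_right (a c l m x : Int) (hl : a * l + c < 0) (hm : 0 ≤ a * m + c)
    (hlm : l ≤ m) (hx : m ≤ x) : 0 ≤ a * x + c := by
  have hlm' : l < m := by
    rcases eq_or_lt_of_le hlm with h | h
    · subst h; omega
    · exact h
  by_contra hneg
  push_neg at hneg
  nlinarith [mul_nonneg hm (by omega : (0:Int) ≤ x - l),
    mul_nonneg (by omega : (0:Int) ≤ -(a * l + c)) (by omega : (0:Int) ≤ x - m)]

-- min-rearrangement facts used to finish each branch of lc_main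
lemma omin_dom (Q : Option Int) (u v w z : Int)
    (hperm : (w = u ∧ z = v) ∨ (w = v ∧ z = u)) (hdom : u ≤ v) :
    omin Q u = omin (some (omin Q w)) z := by
  rcases Q with _ | q <;> rcases hperm with ⟨h1, h2⟩ | ⟨h1, h2⟩ <;> subst h1 <;> subst h2 <;>
    simp only [omin_some, omin] <;> split_ifs <;> omega

lemma omin_ins (Q : Option Int) (u v w z : Int)
    (hperm : (w = u ∧ z = v) ∨ (w = v ∧ z = u)) :
    omin (some (omin Q v)) u = omin (some (omin Q w)) z := by
  rcases Q with _ | q <;> rcases hperm with ⟨h1, h2⟩ | ⟨h1, h2⟩ <;> subst h1 <;> subst h2 <;>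
    simp only [omin_some, omin] <;> split_ifs <;> omega

-- the node case of the insert/query invariant, for an arbitrary ordering (top, bot) of (cur, ln)
lemma lc_node_aux (lt rt : LCT) (l r m : Int) (cur ln top bot : Int × Int)
    (ihl : ∀ (p : Int × Int) (x : Int), l ≤ x → x ≤ m →
      lcQry (lcIns lt l m p) l m x = some (omin (lcQry lt l m x) (lcVal p x)))
    (ihr : ∀ (p : Int × Int) (x : Int), m + 1 ≤ x → x ≤ r →
      lcQry (lcIns rt (m + 1) r p) (m + 1) r x = some (omin (lcQry rt (m + 1) r x) (lcVal p x)))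
    (hpair : (top = ln ∧ bot = cur) ∨ (top = cur ∧ bot = ln))
    (htop : lcVal top m ≤ lcVal bot m)
    (hlm : l ≤ m) (hmr : m ≤ r)
    (hmfd : m = PySem.Int.floordiv (l + r) 2)
    (x : Int) (h1 : l ≤ x) (h2 : x ≤ r) :
    lcQry (if l = r then LCT.node top lt rt
      else if lcVal bot l < lcVal top l then LCT.node top (lcIns lt l m bot) rt
      else if lcVal bot r < lcVal top r then LCT.node top lt (lcIns rt (m + 1) r bot)
      else LCT.node top lt rt) l r x
    = some (omin (lcQry (LCT.node cur lt rt) l r x) (lcVal ln x)) := by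
  have hD : ∀ y : Int, lcVal bot y - lcVal top y = (bot.1 - top.1) * y + (bot.2 - top.2) := by
    intro y; simp [lcVal]; ring
  have hDm : 0 ≤ (bot.1 - top.1) * m + (bot.2 - top.2) := by
    have := hD m; omega
  have hperm : ∀ y : Int,
      (lcVal cur y = lcVal top y ∧ lcVal ln y = lcVal bot y) ∨
      (lcVal cur y = lcVal bot y ∧ lcVal ln y = lcVal top y) := by
    intro y
    rcases hpair with ⟨ha, hb⟩ | ⟨ha, hb⟩
    · exact Or.inr ⟨by rw [hb], by rw [ha]⟩
    · exact Or.inl ⟨by rw [ha], by rw [hb]⟩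
  by_cases hlr0 : l = r
  · -- one-point range: x = l = m, and top is the better line at m
    rw [if_pos hlr0]
    have hmx : m = x := by omega
    have hdom : lcVal top x ≤ lcVal bot x := hmx ▸ htop
    simp only [lcQry, ← hmfd]
    rw [if_pos (by omega : x ≤ m)]
    exact congrArg some (omin_dom _ _ _ _ _ (hperm x) hdom)
  · rw [if_neg hlr0]
    by_cases hcl : lcVal bot l < lcVal top l
    · -- bot may only beat top left of m: recurse left
      rw [if_pos hcl]
      have hDl : (bot.1 - top.1) * l + (bot.2 - top.2) < 0 := by
        have := hD l; omega
      simp only [lcQry, ← hmfd]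
      by_cases hx : x ≤ m
      · rw [if_pos hx, if_pos hx, ihl bot x h1 hx]
        exact congrArg some (omin_ins _ _ _ _ _ (hperm x))
      · rw [if_neg hx, if_neg hx]
        have hdom0 : 0 ≤ (bot.1 - top.1) * x + (bot.2 - top.2) :=
          lin_nonneg_right _ _ l m x hDl hDm hlm (by omega)
        have hdom : lcVal top x ≤ lcVal bot x := by have := hD x; omega
        exact congrArg some (omin_dom _ _ _ _ _ (hperm x) hdom)
    · rw [if_neg hcl]
      have hDl : 0 ≤ (bot.1 - top.1) * l + (bot.2 - top.2) := by
        have := hD l; omega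
      by_cases hcr : lcVal bot r < lcVal top r
      · -- bot may only beat top right of m: recurse right
        rw [if_pos hcr]
        simp only [lcQry, ← hmfd]
        by_cases hx : x ≤ m
        · rw [if_pos hx, if_pos hx]
          have hdom0 : 0 ≤ (bot.1 - top.1) * x + (bot.2 - top.2) :=
            lin_nonneg_between _ _ l m x hDl hDm h1 hx
          have hdom : lcVal top x ≤ lcVal bot x := by have := hD x; omega
          exact congrArg some (omin_dom _ _ _ _ _ (hperm x) hdom)
        · rw [if_neg hx, if_neg hx, ihr bot x (by omega) h2]
          exact congrArg some (omin_ins _ _ _ _ _ (hperm x))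
      · -- top dominates bot on the whole range: drop bot
        rw [if_neg hcr]
        have hDr : 0 ≤ (bot.1 - top.1) * r + (bot.2 - top.2) := by
          have := hD r; omega
        have hdom0 : 0 ≤ (bot.1 - top.1) * x + (bot.2 - top.2) :=
          lin_nonneg_between _ _ l r x hDl hDr h1 h2
        have hdom : lcVal top x ≤ lcVal bot x := by have := hD x; omega
        simp only [lcQry, ← hmfd]
        by_cases hx : x ≤ m
        · rw [if_pos hx]
          exact congrArg some (omin_dom _ _ _ _ _ (hperm x) hdom)
        · rw [if_neg hx]
          exact congrArg some (omin_dom _ _ _ _ _ (hperm x) hdom)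

-- the key invariant: inserting a line adds exactly that line to every query in range
lemma lc_main : ∀ (t : LCT) (l r : Int) (ln : Int × Int) (x : Int), l ≤ x → x ≤ r →
    lcQry (lcIns t l r ln) l r x = some (omin (lcQry t l r x) (lcVal ln x)) := by
  intro t
  induction t with
  | leaf =>
    intro l r ln x h1 h2
    simp [lcIns, lcQry, omin]
  | node cur lt rt ihl ihr =>
    intro l r ln x h1 h2
    have hlr : l ≤ r := h1.trans h2
    obtain ⟨hlm, hmr⟩ := PySem.Int.floordiv_two_mid_bounds hlr
    simp only [lcIns]
    by_cases hc : lcVal ln (PySem.Int.floordiv (l + r) 2) < lcVal cur (PySem.Int.floordiv (l + r) 2)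
    · rw [if_pos hc]
      exact lc_node_aux lt rt l r _ cur ln ln cur
        (fun p y hy1 hy2 => ihl l _ p y hy1 hy2)
        (fun p y hy1 hy2 => ihr _ r p y hy1 hy2)
        (Or.inl ⟨rfl, rfl⟩) (by omega) hlm hmr rfl x h1 h2
    · rw [if_neg hc]
      exact lc_node_aux lt rt l r _ cur ln cur ln
        (fun p y hy1 hy2 => ihl l _ p y hy1 hy2)
        (fun p y hy1 hy2 => ihr _ r p y hy1 hy2)
        (Or.inr ⟨rfl, rfl⟩) (by omega) hlm hmr rfl x h1 h2

-- the reference tree after k insertions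
def treeRef (s : Int) (C T : List Int) (N : ℕ) (Bd : Int) : ℕ → LCT
  | 0 => lcIns .leaf (-Bd) Bd (0, 0)
  | k+1 => lcIns (treeRef s C T N Bd k) (-Bd) Bd (-(scP C (k+1)), hullF s C T N k)

lemma treeRef_qry (s : Int) (C T : List Int) (N : ℕ) (Bd : Int) :
    ∀ (k : ℕ) (x : Int), -Bd ≤ x → x ≤ Bd →
      lcQry (treeRef s C T N Bd k) (-Bd) Bd x
        = some (bmin ((hull s C T N k).map (fun bm => bm.1 - x * bm.2))) := by
  intro k
  induction k with
  | zero =>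
    intro x h1 h2
    rw [treeRef, lc_main _ _ _ _ _ h1 h2]
    simp [lcQry, lcVal, omin, hull, bmin]
  | succ k ih =>
    intro x h1 h2
    rw [treeRef, lc_main _ _ _ _ _ h1 h2, ih x h1 h2, omin_some]
    rw [hull_succ, List.map_append]
    simp only [List.map_cons, List.map_nil]
    rw [bmin_concat ((hull s C T N k).map (fun bm => bm.1 - x * bm.2))
      (by simp [← List.length_pos_iff, length_hull]) (hullF s C T N k - x * scP C (k + 1))]
    simp only [lcVal]
    congr 1
    ring

lemma sum_abs_nonneg : ∀ (l : List Int), 0 ≤ (l.map (fun t => |t|)).sum := by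
  intro l
  induction l with
  | nil => simp
  | cons x xs ih => simp only [List.map_cons, List.sum_cons]; positivity

lemma abs_sum_take : ∀ (l : List Int) (i : ℕ), |(l.take i).sum| ≤ (l.map (fun t => |t|)).sum := by
  intro l
  induction l with
  | nil => intro i; simp
  | cons x xs ih =>
    intro i
    cases i with
    | zero => simpa using sum_abs_nonneg (x :: xs)
    | succ i =>
      simp only [List.take_succ_cons, List.sum_cons, List.map_cons]
      calc |x + (xs.take i).sum| ≤ |x| + |(xs.take i).sum| := abs_add_le _ _
        _ ≤ |x| + (xs.map (fun t => |t|)).sum := by linarith [ih i]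

lemma foldB2 (s : Int) (C T : List Int) (N : ℕ) (sC sT : List Int) (Bd : Int)
    (hC : ∀ i : ℕ, i ≤ N → sC.getD i 0 = scP C i)
    (hT : ∀ i : ℕ, i ≤ N → sT.getD i 0 = scP T i)
    (hBd : ∀ i : ℕ, i ≤ N → -Bd ≤ scP T i + s ∧ scP T i + s ≤ Bd) :
    ∀ m : ℕ, m ≤ N →
    (PySem.List.pyRange 1 ((m : Int) + 1) 1).foldl
      (fun (st : Int × LCT) i =>
        let x := PySem.List.pyGetD sT i 0 + s
        let f := PySem.List.pyGetD sT i 0 * PySem.List.pyGetD sC i 0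
                 + s * PySem.List.pyGetD sC (N : Int) 0
                 + (lcQry st.2 (-Bd) Bd x).getD 0
        (f, lcIns st.2 (-Bd) Bd (-(PySem.List.pyGetD sC i 0), f)))
      ((0 : Int), lcIns .leaf (-Bd) Bd (0, 0))
    = (((hull s C T N m).getLastD (0, 0)).1, treeRef s C T N Bd m) := by
  intro m
  induction m with
  | zero =>
    intro _
    rw [show ((0 : ℕ) : Int) + 1 = 1 by norm_num, PySem.List.pyRange_one_eq_nil le_rfl]
    rfl
  | succ m ih =>
    intro hm
    have hc : ((m + 1 : ℕ) : Int) = (m : Int) + 1 := by push_cast; ring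
    rw [hc, PySem.List.pyRange_one_succ_right (by omega), List.foldl_append, ih (by omega)]
    simp only [List.foldl_cons, List.foldl_nil]
    rw [show ((m : Int) + 1) = ((m + 1 : ℕ) : Int) from hc.symm]
    simp only [PySem.List.pyGetD_natCast]
    rw [hC (m + 1) hm, hC N le_rfl, hT (m + 1) hm]
    obtain ⟨hb1, hb2⟩ := hBd (m + 1) hm
    rw [treeRef_qry s C T N Bd m (scP T (m + 1) + s) hb1 hb2]
    simp only [Option.getD_some]
    rw [hull_succ]
    simp only [List.getLastD_concat]
    have hfold : scP T (m + 1) * scP C (m + 1) + s * scP C N +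
        bmin ((hull s C T N m).map fun bm => bm.1 - (scP T (m + 1) + s) * bm.2)
        = hullF s C T N m := rfl
    rw [hfold, treeRef]

-- ===== VERDICT (by name: the statement is the Claim_ definition above) =====
theorem dp_spec : Claim_equal_dp := by
  intro n s C T _ hpre
  obtain ⟨hn, hrest⟩ := hpre
  unfold Spec_dp
  have hN : ((n.toNat : ℕ) : Int) = n := Int.toNat_of_nonneg hn
  set N := n.toNat with hNdef
  have hCle : ∀ i : ℕ, i ≤ N → i ≤ C.length := by
    rcases hrest with h0 | ⟨h1, _⟩
    · intro i hi; omega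
    · intro i hi
      have h2 : (N : Int) ≤ (C.length : Int) := by rw [hN]; exact h1
      omega
  have hTle : ∀ i : ℕ, i ≤ N → i ≤ T.length := by
    rcases hrest with h0 | ⟨_, h1⟩
    · intro i hi; omega
    · intro i hi
      have h2 : (N : Int) ≤ (T.length : Int) := by rw [hN]; exact h1
      omega
  have hsc : ∀ i : ℕ, i ≤ N → (prefixSumA C).getD i 0 = scP C i :=
    fun i hi => prefixSumA_getD C i (hCle i hi)
  have hst : ∀ i : ℕ, i ≤ N → (prefixSumA T).getD i 0 = scP T i :=
    fun i hi => prefixSumA_getD T i (hTle i hi)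
  have hslC : PySem.List.slice C none (some ((N : ℕ) : Int)) = C.take N := by
    rw [PySem.List.slice_to _ (by omega)]; simp
  have hslT : PySem.List.slice T none (some ((N : ℕ) : Int)) = T.take N := by
    rw [PySem.List.slice_to _ (by omega)]; simp
  have hscB : ∀ i : ℕ, i ≤ N →
      ((C.take N).foldl (fun acc c => acc ++ [PySem.List.pyGetD acc (-1) 0 + c]) [(0 : Int)]).getD i 0
        = scP C i := by
    intro i hi
    rw [scan_getD (C.take N) i (by rw [List.length_take]; exact le_min hi (hCle i hi)),
      List.take_take, min_eq_left hi]
    rfl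
  have hstB : ∀ i : ℕ, i ≤ N →
      ((T.take N).foldl (fun acc t => acc ++ [PySem.List.pyGetD acc (-1) 0 + t]) [(0 : Int)]).getD i 0
        = scP T i := by
    intro i hi
    rw [scan_getD (T.take N) i (by rw [List.length_take]; exact le_min hi (hTle i hi)),
      List.take_take, min_eq_left hi]
    rfl
  have hBd : ∀ i : ℕ, i ≤ N →
      -(|s| + ((T.take N).map (fun t => |t|)).sum + 1) ≤ scP T i + s ∧
      scP T i + s ≤ |s| + ((T.take N).map (fun t => |t|)).sum + 1 := by
    intro i hi
    have h1 : |scP T i| ≤ ((T.take N).map (fun t => |t|)).sum := by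
      have : T.take i = (T.take N).take i := by rw [List.take_take, min_eq_left hi]
      rw [scP, this]
      exact abs_sum_take (T.take N) i
    constructor <;> [nlinarith [abs_nonneg s, le_abs_self s, neg_abs_le s, abs_le.mp h1];
      nlinarith [le_abs_self s, abs_le.mp h1]]
  simp only [dp, dp_alt]
  rw [← hN]
  have hf0 : PySem.List.pySetD
      (List.replicate (((N : ℕ) : Int) + 10).toNat (none : Option Int)) 0 (some 0)
      = stA s C T N 0 := by
    rw [PySem.List.pySetD_of_nonneg _ _ le_rfl,
      show (((N : ℕ) : Int) + 10).toNat = (N + 9) + 1 by omega, List.replicate_succ]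
    simp [stA, hull, show N + 10 - 1 = N + 9 by omega]
  rw [hf0, foldA s C T N (prefixSumA C) (prefixSumA T) hsc hst N le_rfl,
    PySem.List.pyGetD_natCast, stA_getD_lo s C T N N N le_rfl,
    hslC, hslT, foldB2 s C T N _ _ _ hscB hstB hBd N le_rfl]
  rfl
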